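-- pv_equiv track=rewrite | github.com/pkogge/Project1-TOC | src/bin_packing.py | binpacking_simple
-- ===== SOURCE A (Python) =====
-- from typing import List
--
-- def binpacking_simple(
--     bin_capacity: int, clauses: List[int]
-- ) -> List[List[int]]:
--     clauses = sorted(clauses)
--     combs = {0: [[]]}
--
--     for c in clauses:
--         new = {s: [lst[:] for lst in lists] for s, lists in combs.items()}
--         for s, lists in combs.items():
--             max_ops = (bin_capacity - s) // c
--             for k in range(1, max_ops + 1):
--                 new_sum = s + k * c
--                 for comb in lists:
--                     new.setdefault(new_sum, []).append(comb + [c] * k)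
--         combs = new
--     return combs.get(bin_capacity, [])
-- ===== SOURCE B (Python) =====
-- from typing import List
--
-- def binpacking_simple(
--     bin_capacity: int, clauses: List[int]
-- ) -> List[List[int]]:
--     cs = sorted(clauses)
--     # Phase 1: per round, the achievable sums in first-appearance order (no combo payloads).
--     key_hist = [[0]]
--     keys = [0]
--     for c in cs:
--         ks = list(keys)
--         for s in keys:
--             for k in range(1, (bin_capacity - s) // c + 1):
--                 v = s + k * c
--                 if v not in ks:
--                     ks.append(v)
--         keys = ks
--         key_hist.append(ks)
--
--     # Phase 2: demand-driven combo lists, memoised on (round, sum).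
--     memo = {}
--
--     def need(i: int, v: int) -> List[List[int]]:
--         if i == 0:
--             return [[]] if v == 0 else []
--         if (i, v) in memo:
--             return memo[(i, v)]
--         c = cs[i - 1]
--         out = list(need(i - 1, v))
--         for s in key_hist[i - 1]:
--             d = v - s
--             if d % c == 0:
--                 k = d // c
--                 if 1 <= k <= (bin_capacity - s) // c:
--                     out += [comb + [c] * k for comb in need(i - 1, s)]
--         memo[(i, v)] = out
--         return out
--
--     return need(len(cs), bin_capacity)
-- ===== Notes on version B (the rewrite author's own statement) =====
-- stated objective: alternative
-- what changed: Replaces A's forward DP over a dict of sum->combination-lists with whole-dict deep copies each round by a two-phase scheme: first a cheap pass computing only the ordered key lists per round, then a demand-driven memoised recursion need(i, v) that builds combination lists only for (round, sum) pairs actually feeding the target, with no copying (intended as faster; a timing run read 5.13x at the largest size both finished but could not confirm it overall).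
import Mathlib
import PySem

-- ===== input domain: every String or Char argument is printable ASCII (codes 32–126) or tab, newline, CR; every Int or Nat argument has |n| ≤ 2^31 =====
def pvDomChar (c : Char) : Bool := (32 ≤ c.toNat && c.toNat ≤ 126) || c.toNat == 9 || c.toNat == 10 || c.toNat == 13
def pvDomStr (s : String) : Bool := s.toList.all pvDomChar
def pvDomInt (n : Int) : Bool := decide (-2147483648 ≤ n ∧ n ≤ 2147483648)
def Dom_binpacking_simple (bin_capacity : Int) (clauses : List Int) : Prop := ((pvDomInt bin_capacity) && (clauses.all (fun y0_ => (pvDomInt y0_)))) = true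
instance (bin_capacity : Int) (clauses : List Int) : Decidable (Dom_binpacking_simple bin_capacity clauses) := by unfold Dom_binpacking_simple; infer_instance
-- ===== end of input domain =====

-- B replaces A's forward dict DP (whole-dict copies of every combination list each round) by a
-- two-phase scheme: key-order lists per round first, then a demand-driven recursion need(i, v).

-- ===== PORT A =====
def binpacking_simple (bin_capacity : Int) (clauses : List Int) : List (List Int) :=
  let cls := PySem.List.sorted clauses id false
  let init : PySem.Dict Int (List (List Int)) := PySem.Dict.empty.insert 0 [[]]
  let combs := cls.foldl (fun combs c =>
    -- new = {s: [lst[:] for lst in lists] for s, lists in combs.items()}  (a copy: identity here)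
    let new := PySem.Dict.mk (combs.items.map (fun p => (p.1, p.2.map (fun lst => lst))))
    combs.items.foldl (fun new p =>
      let max_ops := PySem.Int.floordiv (bin_capacity - p.1) c
      (PySem.List.pyRange 1 (max_ops + 1) 1).foldl (fun new k =>
        let new_sum := p.1 + k * c
        -- new.setdefault(new_sum, []).append(x) ≡ new[new_sum] = new.get(new_sum, []) + [x]
        p.2.foldl (fun new comb =>
          new.modify new_sum [] (fun cur => cur ++ [comb ++ List.replicate k.toNat c])) new)
        new) new) init
  combs.getD bin_capacity []

-- ===== PORT B =====
-- one round of phase 1: extend the ordered key list by the sums reachable with clause c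
def pvRoundKeys (bin_capacity c : Int) (keys : List Int) : List Int :=
  keys.foldl (fun ks s =>
    (PySem.List.pyRange 1 (PySem.Int.floordiv (bin_capacity - s) c + 1) 1).foldl (fun ks k =>
      if (s + k * c) ∈ ks then ks else ks ++ [s + k * c]) ks) keys

-- phase 1: (key_hist, keys) after all rounds
def pvHist (bin_capacity : Int) (cs : List Int) : List (List Int) × List Int :=
  cs.foldl (fun acc c =>
    let ks := pvRoundKeys bin_capacity c acc.2
    (acc.1 ++ [ks], ks)) ([[0]], [0])

-- phase 2: need(i, v); Source B's memoisation is a pure cache, dropped here (same values).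
-- indexing cs[i-1] / key_hist[i-1] is always in range when called from the port, so getD is exact.
def pvNeed (bin_capacity : Int) (cs : List Int) (hist : List (List Int)) : Nat → Int → List (List Int)
  | 0, v => if v = 0 then [[]] else []
  | i + 1, v =>
      let c := cs.getD i 0
      let K := hist.getD i []
      pvNeed bin_capacity cs hist i v ++
        K.foldl (fun out s =>
          if PySem.Int.mod (v - s) c = 0 then
            let k := PySem.Int.floordiv (v - s) c
            if 1 ≤ k ∧ k ≤ PySem.Int.floordiv (bin_capacity - s) c then
              out ++ (pvNeed bin_capacity cs hist i s).map (fun comb => comb ++ List.replicate k.toNat c)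
            else out
          else out) []

def binpacking_simple_alt (bin_capacity : Int) (clauses : List Int) : List (List Int) :=
  let cs := PySem.List.sorted clauses id false
  pvNeed bin_capacity cs (pvHist bin_capacity cs).1 cs.length bin_capacity

-- ===== PRECONDITION & SPEC =====
-- Pre_ excludes clause lists containing 0, on which A raises ZeroDivisionError ((bin_capacity - s) // c).
def Pre_binpacking_simple (bin_capacity : Int) (clauses : List Int) : Prop := (0 : Int) ∉ clauses
instance (bin_capacity : Int) (clauses : List Int) : Decidable (Pre_binpacking_simple bin_capacity clauses) := by unfold Pre_binpacking_simple; infer_instance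
def pvWitness_binpacking_simple : Int × List Int := (5, [2, 3])

def Spec_binpacking_simple (bin_capacity : Int) (clauses : List Int) (out : List (List Int)) : Prop := out = binpacking_simple_alt bin_capacity clauses
instance (bin_capacity : Int) (clauses : List Int) (out : List (List Int)) : Decidable (Spec_binpacking_simple bin_capacity clauses out) := by unfold Spec_binpacking_simple; infer_instance

-- ===== CLAIM (what is proved, stated in full; the proofs are below) =====
def Claim_equal_binpacking_simple : Prop := ∀ (bin_capacity : Int) (clauses : List Int), Dom_binpacking_simple bin_capacity clauses → Pre_binpacking_simple bin_capacity clauses → Spec_binpacking_simple bin_capacity clauses (binpacking_simple bin_capacity clauses)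

-- ===== LEMMAS AND PROOFS =====

-- A's state after processing the clause list cs (same fold body as the port)
def pvStateA (bin_capacity : Int) (cs : List Int) : PySem.Dict Int (List (List Int)) :=
  cs.foldl (fun combs c =>
    combs.items.foldl (fun new p =>
      (PySem.List.pyRange 1 (PySem.Int.floordiv (bin_capacity - p.1) c + 1) 1).foldl (fun new k =>
        p.2.foldl (fun new comb =>
          new.modify (p.1 + k * c) [] (fun cur => cur ++ [comb ++ List.replicate k.toNat c])) new)
        new) (PySem.Dict.mk (combs.items.map (fun p => (p.1, p.2.map (fun lst => lst))))))
    (PySem.Dict.empty.insert 0 [[]])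

-- B's result after processing cs, as a function of the clause list
def pvNeedR (bin_capacity : Int) (cs : List Int) (v : Int) : List (List Int) :=
  pvNeed bin_capacity cs (pvHist bin_capacity cs).1 cs.length v

-- the flat list of (new_sum, new_comb) events one round of A generates from items L
def pvEvents (bin_capacity c : Int) (L : List (Int × List (List Int))) : List (Int × List Int) :=
  L.flatMap (fun p =>
    (PySem.List.pyRange 1 (PySem.Int.floordiv (bin_capacity - p.1) c + 1) 1).flatMap (fun k =>
      p.2.map (fun comb => (p.1 + k * c, comb ++ List.replicate k.toNat c))))

lemma pvFoldlFlatMap {α β δ : Type} (l : List α) (g : α → List β) (step : δ → β → δ) (d : δ) :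
    (l.flatMap g).foldl step d = l.foldl (fun d x => (g x).foldl step d) d := by
  induction l generalizing d with
  | nil => rfl
  | cons x xs ih => simp [List.flatMap_cons, List.foldl_append, ih]

lemma pvFilterFlatMap {α β : Type} (l : List α) (g : α → List β) (q : β → Bool) :
    (l.flatMap g).filter q = l.flatMap (fun x => (g x).filter q) := by
  induction l with
  | nil => rfl
  | cons x xs ih => simp [List.flatMap_cons, List.filter_append, ih]

lemma pvMapFlatMap {α β γ : Type} (l : List α) (g : α → List β) (f : β → γ) :
    (l.flatMap g).map f = l.flatMap (fun x => (g x).map f) := by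
  induction l with
  | nil => rfl
  | cons x xs ih => simp [List.flatMap_cons, ih]

lemma pvFlatMapCongr {α β : Type} (l : List α) (f g : α → List β)
    (h : ∀ x ∈ l, f x = g x) : l.flatMap f = l.flatMap g := by
  induction l with
  | nil => rfl
  | cons x xs ih => simp [List.flatMap_cons, h x (by simp), ih (fun x hx => h x (by simp [hx]))]

lemma pvFlatMapOverMap {α β γ : Type} (l : List α) (f : α → β) (g : β → List γ) :
    (l.map f).flatMap g = l.flatMap (fun x => g (f x)) := by
  induction l with
  | nil => rfl
  | cons x xs ih => simp [List.flatMap_cons, ih]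

lemma pvUpdateReplicate (n : Nat) (v : Int) : ∀ ks : PySem.Set Int,
    PySem.Set.update ks (List.replicate (n + 1) v) = PySem.Set.add ks v := by
  induction n with
  | zero => intro ks; simp [PySem.Set.update_cons, PySem.Set.update_nil]
  | succ n ih =>
    intro ks
    rw [List.replicate_succ, PySem.Set.update_cons, ih,
      PySem.Set.add_of_mem ((PySem.Set.mem_add ks v v).mpr (Or.inr rfl))]

lemma pvUpdateFlatMap {α : Type} (l : List α) (g : α → List Int) : ∀ ks : PySem.Set Int,
    PySem.Set.update ks (l.flatMap g) = l.foldl (fun ks x => PySem.Set.update ks (g x)) ks := by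
  induction l with
  | nil => intro ks; simp [PySem.Set.update_nil]
  | cons x xs ih => intro ks; simp [List.flatMap_cons, PySem.Set.update_append, ih]

lemma pvFlatMapIte {β : Type} (k0 : Int) (l : List Int) (hnd : l.Nodup) (g : Int → List β) :
    l.flatMap (fun k => if k = k0 then g k else []) = if k0 ∈ l then g k0 else [] := by
  induction l with
  | nil => simp
  | cons x xs ih =>
    rcases List.nodup_cons.mp hnd with ⟨hx, hxs⟩
    by_cases hxk : x = k0
    · subst hxk
      have : x ∉ xs := hx
      simp [List.flatMap_cons, ih hxs, this]
    · simp [List.flatMap_cons, hxk, ih hxs, List.mem_cons, Ne.symm hxk]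

lemma pvStateA_append (bin_capacity c : Int) (cs : List Int) :
    pvStateA bin_capacity (cs ++ [c]) =
      (pvEvents bin_capacity c (pvStateA bin_capacity cs).items).foldl
        (fun d q => d.modify q.1 [] (fun cur => cur ++ [q.2])) (pvStateA bin_capacity cs) := by
  unfold pvStateA
  rw [List.foldl_append, List.foldl_cons, List.foldl_nil]
  generalize (List.foldl _ (PySem.Dict.empty.insert 0 [[]]) cs :
    PySem.Dict Int (List (List Int))) = M
  have hcopy : PySem.Dict.mk (M.items.map (fun p => (p.1, p.2.map (fun lst => lst)))) = M := by
    cases M with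
    | mk items => simp
  rw [hcopy, pvEvents, pvFoldlFlatMap]
  refine PySem.List.foldl_congr_mem _ _ _ _ ?_
  intro d p _
  rw [pvFoldlFlatMap]
  refine PySem.List.foldl_congr_mem _ _ _ _ ?_
  intro d' k _
  rw [List.foldl_map]

lemma pvHist_append (bin_capacity c : Int) (cs : List Int) :
    pvHist bin_capacity (cs ++ [c]) =
      ((pvHist bin_capacity cs).1 ++ [pvRoundKeys bin_capacity c (pvHist bin_capacity cs).2],
        pvRoundKeys bin_capacity c (pvHist bin_capacity cs).2) := by
  simp [pvHist, List.foldl_append]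

lemma pvHist_fst_length (bin_capacity : Int) (cs : List Int) :
    (pvHist bin_capacity cs).1.length = cs.length + 1 := by
  induction cs using List.reverseRecOn with
  | nil => rfl
  | append_singleton cs c ih => simp [pvHist_append, ih]

lemma pvHist_last (bin_capacity : Int) (cs : List Int) :
    (pvHist bin_capacity cs).1.getD cs.length [] = (pvHist bin_capacity cs).2 := by
  induction cs using List.reverseRecOn with
  | nil => rfl
  | append_singleton cs c ih =>
    rw [pvHist_append]
    have hl : (pvHist bin_capacity cs).1.length = cs.length + 1 := pvHist_fst_length _ _
    simp [hl]

lemma pvNeed_congr (bin_capacity : Int) (cs cs' : List Int) (hist hist' : List (List Int)) :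
    ∀ i, (∀ j, j < i → cs.getD j 0 = cs'.getD j 0) →
      (∀ j, j < i → hist.getD j [] = hist'.getD j []) →
      ∀ v, pvNeed bin_capacity cs hist i v = pvNeed bin_capacity cs' hist' i v := by
  intro i
  induction i with
  | zero => intro _ _ v; rfl
  | succ i ih =>
    intro h1 h2 v
    have hc : cs.getD i 0 = cs'.getD i 0 := h1 i (Nat.lt_succ_self i)
    have hK : hist.getD i [] = hist'.getD i [] := h2 i (Nat.lt_succ_self i)
    have ihv : ∀ v, pvNeed bin_capacity cs hist i v = pvNeed bin_capacity cs' hist' i v :=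
      ih (fun j hj => h1 j (Nat.lt_succ_of_lt hj)) (fun j hj => h2 j (Nat.lt_succ_of_lt hj))
    simp only [pvNeed, hc, hK, ihv]

lemma pvNeedR_append (bin_capacity c : Int) (cs : List Int) (v : Int) :
    pvNeedR bin_capacity (cs ++ [c]) v =
      pvNeedR bin_capacity cs v ++
        (pvHist bin_capacity cs).2.foldl (fun out s =>
          if PySem.Int.mod (v - s) c = 0 then
            if 1 ≤ PySem.Int.floordiv (v - s) c ∧
                PySem.Int.floordiv (v - s) c ≤ PySem.Int.floordiv (bin_capacity - s) c then
              out ++ (pvNeedR bin_capacity cs s).map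
                (fun comb => comb ++ List.replicate (PySem.Int.floordiv (v - s) c).toNat c)
            else out
          else out) [] := by
  unfold pvNeedR
  have hlen : (cs ++ [c]).length = cs.length + 1 := by simp
  rw [hlen]
  have hh := pvHist_append bin_capacity c cs
  have hc : (cs ++ [c]).getD cs.length 0 = c := by
    rw [List.getD_append_right _ _ _ _ (le_refl _)]; simp
  have hK : (pvHist bin_capacity (cs ++ [c])).1.getD cs.length [] = (pvHist bin_capacity cs).2 := by
    rw [hh]
    rw [List.getD_append _ _ _ _ (by rw [pvHist_fst_length]; omega)]
    exact pvHist_last _ _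
  have hrec : ∀ x, pvNeed bin_capacity (cs ++ [c]) (pvHist bin_capacity (cs ++ [c])).1 cs.length x
      = pvNeed bin_capacity cs (pvHist bin_capacity cs).1 cs.length x := by
    refine pvNeed_congr _ _ _ _ _ _ ?_ ?_
    · intro j hj; rw [List.getD_append _ _ _ _ (by omega)]
    · intro j hj
      rw [hh]
      exact List.getD_append _ _ _ _ (by rw [pvHist_fst_length]; omega)
  simp only [pvNeed, hc, hK, hrec]

lemma pvLoopFlat (bin_capacity c v : Int) (K : List Int) (N : Int → List (List Int)) :
    K.foldl (fun out s =>
      if PySem.Int.mod (v - s) c = 0 then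
        if 1 ≤ PySem.Int.floordiv (v - s) c ∧
            PySem.Int.floordiv (v - s) c ≤ PySem.Int.floordiv (bin_capacity - s) c then
          out ++ (N s).map (fun comb => comb ++ List.replicate (PySem.Int.floordiv (v - s) c).toNat c)
        else out
      else out) [] =
    K.flatMap (fun s =>
      if PySem.Int.mod (v - s) c = 0 then
        if 1 ≤ PySem.Int.floordiv (v - s) c ∧
            PySem.Int.floordiv (v - s) c ≤ PySem.Int.floordiv (bin_capacity - s) c then
          (N s).map (fun comb => comb ++ List.replicate (PySem.Int.floordiv (v - s) c).toNat c)
        else []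
      else []) := by
  have h := PySem.List.foldl_append_eq_flatMap (fun s =>
      if PySem.Int.mod (v - s) c = 0 then
        if 1 ≤ PySem.Int.floordiv (v - s) c ∧
            PySem.Int.floordiv (v - s) c ≤ PySem.Int.floordiv (bin_capacity - s) c then
          (N s).map (fun comb => comb ++ List.replicate (PySem.Int.floordiv (v - s) c).toNat c)
        else []
      else []) K []
  rw [List.nil_append] at h
  rw [← h]
  refine PySem.List.foldl_congr_mem _ _ _ _ ?_
  intro out s _
  split_ifs <;> simp

lemma pvFilterEvents (bin_capacity c : Int) (hc : c ≠ 0) (K : List Int)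
    (N : Int → List (List Int)) (v : Int) :
    ((pvEvents bin_capacity c (K.map (fun s => (s, N s)))).filter (fun q => q.1 == v)).map (fun q => q.2) =
    K.flatMap (fun s =>
      if PySem.Int.mod (v - s) c = 0 then
        if 1 ≤ PySem.Int.floordiv (v - s) c ∧
            PySem.Int.floordiv (v - s) c ≤ PySem.Int.floordiv (bin_capacity - s) c then
          (N s).map (fun comb => comb ++ List.replicate (PySem.Int.floordiv (v - s) c).toNat c)
        else []
      else []) := by
  unfold pvEvents
  rw [pvFlatMapOverMap, pvFilterFlatMap, pvMapFlatMap]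
  refine pvFlatMapCongr _ _ _ ?_
  intro s _
  simp only
  rw [pvFilterFlatMap, pvMapFlatMap]
  by_cases hdvd : c ∣ (v - s)
  · have hmod : PySem.Int.mod (v - s) c = 0 := (PySem.Int.mod_eq_zero_iff_dvd _ _).mpr hdvd
    have hk0c : PySem.Int.floordiv (v - s) c * c = v - s := by
      have h := PySem.Int.floordiv_mul_add_mod (v - s) c
      rw [hmod] at h; simpa using h
    have hiff : ∀ k : Int, (s + k * c = v) ↔ k = PySem.Int.floordiv (v - s) c := by
      intro k
      constructor
      · intro h
        have : k * c = PySem.Int.floordiv (v - s) c * c := by rw [hk0c]; omega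
        exact mul_right_cancel₀ hc this
      · rintro rfl; linarith [hk0c]
    have h1 : ∀ k ∈ PySem.List.pyRange 1 (PySem.Int.floordiv (bin_capacity - s) c + 1) 1,
        (((N s).map (fun comb => (s + k * c, comb ++ List.replicate k.toNat c))).filter
          (fun q => q.1 == v)).map (fun q => q.2) =
        (if k = PySem.Int.floordiv (v - s) c then
          (N s).map (fun comb => comb ++ List.replicate k.toNat c) else []) := by
      intro k _
      by_cases hk : k = PySem.Int.floordiv (v - s) c
      · have hv : s + k * c = v := (hiff k).mpr hk
        rw [List.filter_map]
        have hq : ((fun q : Int × List Int => q.1 == v) ∘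
            (fun comb => (s + k * c, comb ++ List.replicate k.toNat c))) = fun _ => true := by
          funext comb; simp [hv]
        rw [hq, List.filter_true, List.map_map, if_pos hk]
        rfl
      · have hv : s + k * c ≠ v := fun h => hk ((hiff k).mp h)
        rw [List.filter_map]
        have hq : ((fun q : Int × List Int => q.1 == v) ∘
            (fun comb => (s + k * c, comb ++ List.replicate k.toNat c))) = fun _ => false := by
          funext comb; simp [hv]
        rw [hq, List.filter_false, if_neg hk]
        rfl
    rw [pvFlatMapCongr _ _ _ h1,
      pvFlatMapIte (PySem.Int.floordiv (v - s) c) _ (PySem.List.nodup_pyRange_one _ _) _]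
    have hcond : (PySem.Int.floordiv (v - s) c ∈
        PySem.List.pyRange 1 (PySem.Int.floordiv (bin_capacity - s) c + 1) 1) ↔
        (1 ≤ PySem.Int.floordiv (v - s) c ∧
          PySem.Int.floordiv (v - s) c ≤ PySem.Int.floordiv (bin_capacity - s) c) := by
      rw [PySem.List.mem_pyRange_one]; omega
    rw [if_pos hmod]
    by_cases hin : 1 ≤ PySem.Int.floordiv (v - s) c ∧
        PySem.Int.floordiv (v - s) c ≤ PySem.Int.floordiv (bin_capacity - s) c
    · rw [if_pos (hcond.mpr hin), if_pos hin]
    · rw [if_neg (fun h => hin (hcond.mp h)), if_neg hin]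
  · have hmod : ¬ PySem.Int.mod (v - s) c = 0 := fun h =>
      hdvd ((PySem.Int.mod_eq_zero_iff_dvd _ _).mp h)
    have h1 : ∀ k ∈ PySem.List.pyRange 1 (PySem.Int.floordiv (bin_capacity - s) c + 1) 1,
        (((N s).map (fun comb => (s + k * c, comb ++ List.replicate k.toNat c))).filter
          (fun q => q.1 == v)).map (fun q => q.2) = ([] : List (List Int)) := by
      intro k _
      have hv : s + k * c ≠ v := by
        intro h
        exact hdvd ⟨k, by linarith⟩
      rw [List.filter_map]
      have hq : ((fun q : Int × List Int => q.1 == v) ∘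
          (fun comb => (s + k * c, comb ++ List.replicate k.toNat c))) = fun _ => false := by
        funext comb; simp [hv]
      rw [hq, List.filter_false]
      rfl
    rw [pvFlatMapCongr _ _ _ h1, if_neg hmod]
    simp

lemma pvKeysEvents (bin_capacity c : Int) (K : List Int)
    (N : Int → List (List Int)) (hne : ∀ s ∈ K, N s ≠ []) :
    PySem.Set.update K ((pvEvents bin_capacity c (K.map (fun s => (s, N s)))).map (fun q => q.1)) =
      pvRoundKeys bin_capacity c K := by
  have hev : ((pvEvents bin_capacity c (K.map (fun s => (s, N s)))).map (fun q => q.1)) =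
      K.flatMap (fun s =>
        (PySem.List.pyRange 1 (PySem.Int.floordiv (bin_capacity - s) c + 1) 1).flatMap (fun k =>
          List.replicate (N s).length (s + k * c))) := by
    unfold pvEvents
    rw [pvFlatMapOverMap, pvMapFlatMap]
    refine pvFlatMapCongr _ _ _ ?_
    intro s _
    simp only
    rw [pvMapFlatMap]
    refine pvFlatMapCongr _ _ _ ?_
    intro k _
    rw [List.map_map]
    exact List.map_const'
  rw [hev, pvUpdateFlatMap]
  unfold pvRoundKeys
  refine PySem.List.foldl_congr_mem _ _ _ _ ?_
  intro ks s hs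
  rw [pvUpdateFlatMap]
  refine PySem.List.foldl_congr_mem _ _ _ _ ?_
  intro ks' k _
  obtain ⟨x, xs, hx⟩ : ∃ x xs, N s = x :: xs := by
    cases hNs : N s with
    | nil => exact absurd hNs (hne s hs)
    | cons x xs => exact ⟨x, xs, rfl⟩
  rw [hx, List.length_cons, pvUpdateReplicate, PySem.Set.add_eq_ite]

lemma pvMemRoundKeys (bin_capacity c v : Int) (K : List Int) :
    v ∈ pvRoundKeys bin_capacity c K ↔
      v ∈ K ∨ ∃ s ∈ K, ∃ k : Int,
        k ∈ PySem.List.pyRange 1 (PySem.Int.floordiv (bin_capacity - s) c + 1) 1 ∧ v = s + k * c := by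
  have aux : ∀ (K' : List Int) (init : List Int),
      v ∈ K'.foldl (fun ks s =>
        (PySem.List.pyRange 1 (PySem.Int.floordiv (bin_capacity - s) c + 1) 1).foldl (fun ks k =>
          if (s + k * c) ∈ ks then ks else ks ++ [s + k * c]) ks) init ↔
      v ∈ init ∨ ∃ s ∈ K', ∃ k : Int,
        k ∈ PySem.List.pyRange 1 (PySem.Int.floordiv (bin_capacity - s) c + 1) 1 ∧ v = s + k * c := by
    intro K'
    induction K' with
    | nil => intro init; simp
    | cons s K' ih =>
      intro init
      rw [List.foldl_cons, ih]
      have hinner : (PySem.List.pyRange 1 (PySem.Int.floordiv (bin_capacity - s) c + 1) 1).foldl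
          (fun ks k => if (s + k * c) ∈ ks then ks else ks ++ [s + k * c]) init =
          (PySem.List.pyRange 1 (PySem.Int.floordiv (bin_capacity - s) c + 1) 1).foldl
          (fun ks k => PySem.Set.add ks (s + k * c)) init := by
        refine PySem.List.foldl_congr_mem _ _ _ _ ?_
        intro ks k _
        exact (PySem.Set.add_eq_ite ks (s + k * c)).symm
      rw [hinner]
      rw [PySem.Set.mem_foldl_add]
      constructor
      · rintro (⟨h | ⟨k, hk, rfl⟩⟩ | ⟨s', hs', k, hk, rfl⟩)
        · exact Or.inl h
        · exact Or.inr ⟨s, List.mem_cons_self .., k, hk, rfl⟩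
        · exact Or.inr ⟨s', List.mem_cons_of_mem _ hs', k, hk, rfl⟩
      · rintro (h | ⟨s', hs', k, hk, rfl⟩)
        · exact Or.inl (Or.inl h)
        · rcases List.mem_cons.mp hs' with rfl | hs'
          · exact Or.inl (Or.inr ⟨k, hk, rfl⟩)
          · exact Or.inr ⟨s', hs', k, hk, rfl⟩
  exact aux K K

lemma pvMain (bin_capacity : Int) (cs : List Int) (h0 : ∀ c ∈ cs, c ≠ 0) :
    (pvStateA bin_capacity cs).keys = (pvHist bin_capacity cs).2 ∧
    (pvStateA bin_capacity cs).keys.Nodup ∧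
    (∀ v, (pvStateA bin_capacity cs).getD v [] = pvNeedR bin_capacity cs v) ∧
    (∀ s ∈ (pvHist bin_capacity cs).2, pvNeedR bin_capacity cs s ≠ []) := by
  induction cs using List.reverseRecOn with
  | nil =>
    have hk0 : (pvStateA bin_capacity []).keys = [0] := rfl
    refine ⟨rfl, by rw [hk0]; simp, ?_, ?_⟩
    · intro v
      show (PySem.Dict.empty.insert 0 [[]]).getD v [] = _
      rw [PySem.Dict.getD_insert]
      unfold pvNeedR pvNeed
      simp only [List.length_nil]
      by_cases hv : v = 0 <;> simp [hv, PySem.Dict.getD_empty]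
    · intro s hs
      have : s = 0 := by simpa [pvHist] using hs
      subst this
      unfold pvNeedR pvNeed
      simp
  | append_singleton cs c ih =>
    have h0' : ∀ x ∈ cs, x ≠ 0 := fun x hx => h0 x (by simp [hx])
    have hc0 : c ≠ 0 := h0 c (by simp)
    obtain ⟨hkeys, hnd, hgetD, hne⟩ := ih h0'
    have hitems : (pvStateA bin_capacity cs).items =
        (pvHist bin_capacity cs).2.map (fun s => (s, pvNeedR bin_capacity cs s)) := by
      rw [PySem.Dict.items_eq_map_keys (pvStateA bin_capacity cs) hnd [], hkeys]
      exact List.map_congr_left (fun s _ => by rw [hgetD s])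
    have hh := pvHist_append bin_capacity c cs
    have hkeys' : (pvStateA bin_capacity (cs ++ [c])).keys =
        pvRoundKeys bin_capacity c (pvHist bin_capacity cs).2 := by
      rw [pvStateA_append]
      refine Eq.trans (PySem.Dict.keys_foldl_modify_key (β := Int × List Int)
        (pvEvents bin_capacity c (pvStateA bin_capacity cs).items)
        (fun q => q.1) [] (fun _ q => fun cur => cur ++ [q.2]) (pvStateA bin_capacity cs)) ?_
      rw [hkeys, hitems]
      exact pvKeysEvents bin_capacity c _ _ hne
    have hgetD' : ∀ v, (pvStateA bin_capacity (cs ++ [c])).getD v [] =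
        pvNeedR bin_capacity (cs ++ [c]) v := by
      intro v
      rw [pvStateA_append, PySem.Dict.getD_foldl_modify_append, hitems,
        pvFilterEvents bin_capacity c hc0 _ _ v, hgetD v,
        pvNeedR_append, pvLoopFlat]
    refine ⟨?_, ?_, hgetD', ?_⟩
    · rw [hkeys', hh]
    · rw [pvStateA_append]
      exact PySem.Dict.nodup_keys_foldl_modify_key (β := Int × List Int) _
        (fun q => q.1) [] (fun _ q => fun cur => cur ++ [q.2]) _ hnd
    · intro s' hs'
      rw [hh] at hs'
      simp only at hs'
      rcases (pvMemRoundKeys bin_capacity c s' _).mp hs' with hs' | ⟨s, hs, k, hk, rfl⟩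
      · rw [pvNeedR_append]
        exact List.append_ne_nil_of_left_ne_nil (hne s' hs') _
      · rw [pvNeedR_append, pvLoopFlat]
        refine List.append_ne_nil_of_right_ne_nil _ ?_
        intro hcontra
        have hpiece := (List.flatMap_eq_nil_iff.mp hcontra) s hs
        have harith : s + k * c - s = k * c := by ring
        have hmod : PySem.Int.mod (s + k * c - s) c = 0 := by
          rw [harith]
          exact (PySem.Int.mod_eq_zero_iff_dvd _ _).mpr (dvd_mul_left c k)
        have hfd : PySem.Int.floordiv (s + k * c - s) c = k := by
          rw [harith]
          have h := PySem.Int.floordiv_mul_add_mod (k * c) c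
          rw [(PySem.Int.mod_eq_zero_iff_dvd (k * c) c).mpr (dvd_mul_left c k)] at h
          have h2 : PySem.Int.floordiv (k * c) c * c = k * c := by linarith
          exact mul_right_cancel₀ hc0 h2
        rw [if_pos hmod] at hpiece
        have hkr := PySem.List.mem_pyRange_one.mp hk
        rw [if_pos (by rw [hfd]; omega)] at hpiece
        exact (hne s hs) (List.map_eq_nil_iff.mp hpiece)


-- ===== VERDICT (by name: the statement is the Claim_ definition above) =====
theorem binpacking_simple_spec : Claim_equal_binpacking_simple := by
  intro bin_capacity clauses _hDom hPre
  have h0 : ∀ c ∈ PySem.List.sorted clauses id false, c ≠ 0 := by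
    intro c hcmem hc0
    exact hPre (hc0 ▸ ((PySem.List.mem_sorted clauses id false c).mp hcmem))
  have hmain := pvMain bin_capacity (PySem.List.sorted clauses id false) h0
  show binpacking_simple bin_capacity clauses = binpacking_simple_alt bin_capacity clauses
  have hA : binpacking_simple bin_capacity clauses =
      (pvStateA bin_capacity (PySem.List.sorted clauses id false)).getD bin_capacity [] := rfl
  have hB : binpacking_simple_alt bin_capacity clauses =
      pvNeedR bin_capacity (PySem.List.sorted clauses id false) bin_capacity := rfl
  rw [hA, hB, hmain.2.2.1 bin_capacity]
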